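-- pv_equiv track=rewrite | github.com/smearle/script-doctor | env.py | expand_meta_objs
-- ===== SOURCE A (Python) =====
-- from typing import Dict, Iterable, List, Optional, Tuple, Union
--
-- def expand_meta_objs(tile_list: List, meta_objs, char_to_obj):
--     assert isinstance(tile_list, list), f"tile_list should be a list, got {type(tile_list)}"
--     expanded_meta_objs = []
--     for mo in tile_list:
--         if mo in meta_objs:
--             expanded_meta_objs += expand_meta_objs(meta_objs[mo], meta_objs, char_to_obj)
--         elif mo in char_to_obj:
--             expanded_meta_objs.append(char_to_obj[mo])
--         # elif mt in obj_to_idxs: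
--         else:
--             expanded_meta_objs.append(mo)
--         # else:
--         #     raise Exception(f'Invalid meta-tile `{mt}`.')
--     return expanded_meta_objs
-- ===== SOURCE B (Python) =====
-- def expand_meta_objs(tile_list, meta_objs, char_to_obj):
--     assert isinstance(tile_list, list), f"tile_list should be a list, got {type(tile_list)}"
--     out = []
--     stack = list(reversed(tile_list))
--     while stack:
--         tok = stack.pop()
--         if tok in meta_objs:
--             children = meta_objs[tok]
--             assert isinstance(children, list), f"tile_list should be a list, got {type(children)}"
--             stack.extend(reversed(children))
--         elif tok in char_to_obj:
--             out.append(char_to_obj[tok])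
--         else:
--             out.append(tok)
--     return out
-- ===== Notes on version B (the rewrite author's own statement) =====
-- stated objective: alternative
-- what changed: Replaces A's recursive expansion (recursion into meta_objs values with list concatenation) by a single iterative worklist loop: a stack seeded with tile_list is popped token by token, meta-object children are pushed back in reverse so the depth-first left-to-right order is preserved, and leaves are appended to one output accumulator. Pre_ excludes exactly the inputs whose expansion from tile_list is cyclic: there A recurses forever and raises RecursionError (and B's loop would not terminate); cycles in parts of meta_objs never reached from tile_list are admitted and proved equivalent.
import Mathlib
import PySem

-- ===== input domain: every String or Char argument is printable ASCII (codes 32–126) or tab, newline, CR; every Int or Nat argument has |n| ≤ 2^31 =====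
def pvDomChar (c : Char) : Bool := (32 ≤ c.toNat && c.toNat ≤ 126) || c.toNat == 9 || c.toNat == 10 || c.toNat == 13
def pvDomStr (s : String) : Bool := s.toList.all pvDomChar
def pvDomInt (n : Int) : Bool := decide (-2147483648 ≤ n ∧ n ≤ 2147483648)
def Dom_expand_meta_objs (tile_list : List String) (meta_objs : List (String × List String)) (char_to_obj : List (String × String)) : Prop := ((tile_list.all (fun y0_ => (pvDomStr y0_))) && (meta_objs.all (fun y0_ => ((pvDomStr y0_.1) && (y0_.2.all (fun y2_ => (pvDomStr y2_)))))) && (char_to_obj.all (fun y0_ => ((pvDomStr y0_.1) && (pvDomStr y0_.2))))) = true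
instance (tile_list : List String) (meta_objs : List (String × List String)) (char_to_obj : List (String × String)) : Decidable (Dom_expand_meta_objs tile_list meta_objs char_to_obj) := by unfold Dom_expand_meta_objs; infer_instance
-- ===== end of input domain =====

-- ===== PORT A =====
-- B is an iterative worklist traversal replacing A's recursion (objective: alternative decomposition;
-- same asymptotic cost). A raises RecursionError when expansion of a tile_list token is cyclic:
-- Pre_ below excludes exactly those inputs.
-- Port of A: the recursion is guarded by fuel (meta_objs.length + 1), which bounds the recursion depth
-- under Pre_ (this guard only makes the same computation total; it is proved never to be hit on Pre_).
-- Each loop-body branch appends to the accumulator: `expanded += recurse(...)` / `.append(x)` become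
-- `acc ++ ...` / `acc ++ [x]`.
def emoExpand : Nat → List String → List (String × List String) → List (String × String) → List String
  | 0, _, _, _ => []      -- fuel exhausted: unreachable under Pre_
  | f+1, tile_list, meta_objs, char_to_obj =>
    tile_list.foldl (fun acc m =>
      acc ++ (match meta_objs.lookup m with
              | some v => emoExpand f v meta_objs char_to_obj
              | none =>
                match char_to_obj.lookup m with
                | some c => [c]
                | none => [m])) []

def expand_meta_objs (tile_list : List String) (meta_objs : List (String × List String)) (char_to_obj : List (String × String)) : List String :=
  emoExpand (meta_objs.length + 1) tile_list meta_objs char_to_obj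

-- ===== PORT B =====
-- Fuel for B's while-loop = total number of worklist pops, computed as the total weight (node count of
-- the expansion forest) of tile_list; again only a totality guard, exact under Pre_.
def bWeight : Nat → String → List (String × List String) → Nat
  | 0, _, _ => 1
  | d+1, t, meta_objs =>
    match meta_objs.lookup t with
    | some v => 1 + (v.map (fun s => bWeight d s meta_objs)).sum
    | none => 1

-- The Python stack pops from the end; modelled head-as-top, so `stack = list(reversed(tile_list))`
-- is the list tile_list itself and `stack.extend(reversed(children))` is `children ++ s`.
def bLoop : Nat → List String → List String → List (String × List String) → List (String × String) → List String
  | 0, _, out, _, _ => out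
  | _+1, [], out, _, _ => out
  | f+1, t :: s, out, meta_objs, char_to_obj =>
    match meta_objs.lookup t with
    | some v => bLoop f (v ++ s) out meta_objs char_to_obj
    | none =>
      match char_to_obj.lookup t with
      | some c => bLoop f s (out ++ [c]) meta_objs char_to_obj
      | none => bLoop f s (out ++ [t]) meta_objs char_to_obj

def expand_meta_objs_alt (tile_list : List String) (meta_objs : List (String × List String)) (char_to_obj : List (String × String)) : List String :=
  bLoop ((tile_list.map (fun t => bWeight (meta_objs.length + 1) t meta_objs)).sum) tile_list [] meta_objs char_to_obj

-- ===== PRECONDITION & SPEC =====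
-- Acyclicity check on the key-reference graph of meta_objs: repeatedly eliminate entries whose value
-- list references no remaining entry's key; after meta_objs.length rounds the surviving entries are
-- exactly those whose expansion never terminates.
def pvPeelStep (meta_objs : List (String × List String)) (rem : List Nat) : List Nat :=
  rem.filter (fun i =>
    (((meta_objs[i]?).map Prod.snd).getD []).any (fun s =>
      rem.any (fun j => (meta_objs[j]?).map Prod.fst == some s)))

def pvPeelN (meta_objs : List (String × List String)) : Nat → List Nat
  | 0 => List.range meta_objs.length
  | r+1 => pvPeelStep meta_objs (pvPeelN meta_objs r)

-- Pre_ excludes exactly the inputs on which A's expansion from tile_list is cyclic and A raises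
-- RecursionError (B's loop would not terminate there): it requires, for each tile_list token, that the
-- entry the dict lookup finds for it (the first entry with that key, if any) is peeled away — i.e. its
-- own expansion terminates. Cyclic entries of meta_objs never reached from tile_list are admitted.
def Pre_expand_meta_objs (tile_list : List String) (meta_objs : List (String × List String)) (char_to_obj : List (String × String)) : Prop :=
  ∀ t ∈ tile_list, ∀ j, j < meta_objs.length →
    (meta_objs[j]?).map Prod.fst = some t →
    (∀ i, i < j → (meta_objs[i]?).map Prod.fst ≠ some t) →
    j ∉ pvPeelN meta_objs meta_objs.length
instance (tile_list : List String) (meta_objs : List (String × List String)) (char_to_obj : List (String × String)) : Decidable (Pre_expand_meta_objs tile_list meta_objs char_to_obj) := by unfold Pre_expand_meta_objs; infer_instance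

def pvWitness_expand_meta_objs : List String × (List (String × List String)) × (List (String × String)) :=
  (["M", "p"], [("M", ["a", "N"]), ("N", ["b"])], [("p", "player")])

def Spec_expand_meta_objs (tile_list : List String) (meta_objs : List (String × List String)) (char_to_obj : List (String × String)) (out : List String) : Prop := out = expand_meta_objs_alt tile_list meta_objs char_to_obj
instance (tile_list : List String) (meta_objs : List (String × List String)) (char_to_obj : List (String × String)) (out : List String) : Decidable (Spec_expand_meta_objs tile_list meta_objs char_to_obj out) := by unfold Spec_expand_meta_objs; infer_instance

-- ===== CLAIM (what is proved, stated in full; the proofs are below) =====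
def Claim_equal_expand_meta_objs : Prop := ∀ (tile_list : List String) (meta_objs : List (String × List String)) (char_to_obj : List (String × String)), Dom_expand_meta_objs tile_list meta_objs char_to_obj → Pre_expand_meta_objs tile_list meta_objs char_to_obj → Spec_expand_meta_objs tile_list meta_objs char_to_obj (expand_meta_objs tile_list meta_objs char_to_obj)

-- ===== LEMMAS AND PROOFS =====

-- first-match lookup yields the FIRST index carrying that key, with its value
lemma emo_lookup_idx {β : Type} (mo : List (String × β)) (t : String) (v : β)
    (h : mo.lookup t = some v) :
    ∃ j, j < mo.length ∧ (mo[j]?).map Prod.fst = some t ∧ (mo[j]?).map Prod.snd = some v ∧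
      (∀ i, i < j → (mo[i]?).map Prod.fst ≠ some t) := by
  induction mo with
  | nil => simp [List.lookup] at h
  | cons p rest ih =>
    rw [List.lookup] at h
    by_cases hb : t == p.1
    · refine ⟨0, by simp, ?_, ?_, by omega⟩ <;> simp_all [beq_iff_eq]
    · simp only [hb] at h
      obtain ⟨j, hj, h1, h2, h3⟩ := ih h
      refine ⟨j + 1, by simpa using Nat.succ_lt_succ hj, by simpa using h1, by simpa using h2, ?_⟩
      intro i hi
      cases i with
      | zero =>
        simp only [List.getElem?_cons_zero, Option.map_some]
        intro hp
        exact hb (by simp [(Option.some.inj hp).symm])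
      | succ i => simpa using h3 i (by omega)

-- "every key token of l has a (first-match) defining entry eliminated after r peel rounds"
def emoOK (mo : List (String × List String)) (r : Nat) (l : List String) : Prop :=
  ∀ s ∈ l, ∀ v, mo.lookup s = some v →
    ∃ j, j < mo.length ∧ (mo[j]?).map Prod.fst = some s ∧ (mo[j]?).map Prod.snd = some v ∧
      j ∉ pvPeelN mo r

-- the peel chain only removes indices
lemma emo_peel_subset (mo : List (String × List String)) (r : Nat) :
    pvPeelN mo (r + 1) ⊆ pvPeelN mo r := by
  simp only [pvPeelN, pvPeelStep]; exact fun x hx => List.mem_of_mem_filter hx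

lemma emo_peel_antitone (mo : List (String × List String)) {r r' : Nat} (h : r ≤ r') :
    pvPeelN mo r' ⊆ pvPeelN mo r := by
  induction r' with
  | zero => have : r = 0 := by omega
            subst this; exact fun x hx => hx
  | succ n ih =>
    by_cases hr : r = n + 1
    · subst hr; exact fun x hx => hx
    · exact fun x hx => ih (by omega) (emo_peel_subset mo n hx)

lemma emoOK_mono (mo : List (String × List String)) {r r' : Nat} (h : r ≤ r')
    {l : List String} (hok : emoOK mo r l) : emoOK mo r' l := by
  intro s hs v hlk
  obtain ⟨j, hj, h1, h2, h3⟩ := hok s hs v hlk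
  exact ⟨j, hj, h1, h2, fun hmem => h3 (emo_peel_antitone mo h hmem)⟩

-- an index gone at round n was removed at a definite round
lemma emo_removal_round (mo : List (String × List String)) :
    ∀ n j, j ∈ pvPeelN mo 0 → j ∉ pvPeelN mo n → ∃ r, r < n ∧ j ∈ pvPeelN mo r ∧ j ∉ pvPeelN mo (r + 1) := by
  intro n
  induction n with
  | zero => intro j h0 hn; exact absurd h0 hn
  | succ n ih =>
    intro j h0 hn
    by_cases hmem : j ∈ pvPeelN mo n
    · exact ⟨n, Nat.lt_succ_self n, hmem, hn⟩
    · obtain ⟨r, hr, h1, h2⟩ := ih j h0 hmem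
      exact ⟨r, Nat.lt_succ_of_lt hr, h1, h2⟩

-- what removal at round r+1 means: no value token of the removed entry matches a remaining entry's key
lemma emo_removed_cond (mo : List (String × List String)) {r j : Nat}
    (hin : j ∈ pvPeelN mo r) (hout : j ∉ pvPeelN mo (r + 1)) :
    ∀ s ∈ (((mo[j]?).map Prod.snd).getD []), ∀ j', j' ∈ pvPeelN mo r →
      (mo[j']?).map Prod.fst ≠ some s := by
  intro s hs j' hj' hkey
  apply hout
  simp only [pvPeelN, pvPeelStep, List.mem_filter]
  refine ⟨hin, ?_⟩
  simp only [List.any_eq_true]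
  exact ⟨s, hs, j', hj', by simp [hkey]⟩

-- if the entry defining a token was removed at round r+1, its value list is emoOK at round r
lemma emo_children_ok (mo : List (String × List String)) {r j : Nat} {v : List String}
    (hval : (mo[j]?).map Prod.snd = some v)
    (hin : j ∈ pvPeelN mo r) (hout : j ∉ pvPeelN mo (r + 1)) :
    emoOK mo r v := by
  intro s hs v' hlk'
  obtain ⟨j', hj', hkey', hval', _⟩ := emo_lookup_idx mo s v' hlk'
  refine ⟨j', hj', hkey', hval', fun hmem => ?_⟩
  exact emo_removed_cond mo hin hout s (by rw [hval]; exact hs) j' hmem hkey'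

-- from an emoOK token at the final round, its value list is emoOK at some earlier round
lemma emo_value_ok (mo : List (String × List String)) {t : String} {v : List String}
    (hok : emoOK mo mo.length [t]) (hlk : mo.lookup t = some v) :
    ∃ r, r < mo.length ∧ emoOK mo r v := by
  obtain ⟨j, hj, _, hval, hn⟩ := hok t (by simp) v hlk
  have h0 : j ∈ pvPeelN mo 0 := by simpa [pvPeelN] using hj
  obtain ⟨r, hr, hin, hout⟩ := emo_removal_round mo mo.length j h0 hn
  exact ⟨r, hr, emo_children_ok mo hval hin hout⟩

-- emoOK at the final round is closed under one expansion step
lemma emoOK_close (mo : List (String × List String)) {t : String} {v : List String}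
    (hok : emoOK mo mo.length [t]) (hlk : mo.lookup t = some v) :
    emoOK mo mo.length v := by
  obtain ⟨r, hr, h⟩ := emo_value_ok mo hok hlk
  exact emoOK_mono mo (Nat.le_of_lt hr) h

lemma emoOK_of_cons (mo : List (String × List String)) {r : Nat} {t : String} {s : List String}
    (hok : emoOK mo r (t :: s)) : emoOK mo r [t] ∧ emoOK mo r s :=
  ⟨fun x hx => hok x (by simp_all), fun x hx => hok x (List.mem_cons_of_mem t hx)⟩

lemma emoOK_append (mo : List (String × List String)) {r : Nat} {l₁ l₂ : List String}
    (h1 : emoOK mo r l₁) (h2 : emoOK mo r l₂) : emoOK mo r (l₁ ++ l₂) := by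
  intro x hx
  rcases List.mem_append.mp hx with h | h
  exacts [h1 x h, h2 x h]

-- the A-side fold over a singleton is its per-token expansion
lemma emo_single (a : Nat) (m : String) (mo : List (String × List String)) (co : List (String × String)) :
    emoExpand (a + 1) [m] mo co =
      (match mo.lookup m with
       | some v => emoExpand a v mo co
       | none => match co.lookup m with
                 | some c => [c]
                 | none => [m]) := by
  simp [emoExpand]

-- fuel stability of the A port: any fuel > r computes the same value on an emoOK-r list
lemma emo_stable (mo : List (String × List String)) (co : List (String × String)) :
    ∀ r l f₁ f₂, emoOK mo r l → r < f₁ → r < f₂ →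
      emoExpand f₁ l mo co = emoExpand f₂ l mo co := by
  intro r
  induction r with
  | zero =>
    intro l f₁ f₂ hok h1 h2
    obtain ⟨a, rfl⟩ : ∃ a, f₁ = a + 1 := ⟨f₁ - 1, by omega⟩
    obtain ⟨b, rfl⟩ : ∃ b, f₂ = b + 1 := ⟨f₂ - 1, by omega⟩
    simp only [emoExpand]
    rw [PySem.List.foldl_append_eq_flatMap, PySem.List.foldl_append_eq_flatMap]
    simp only [List.nil_append]
    apply List.flatMap_congr
    intro m hm
    cases hlk : mo.lookup m with
    | none => rfl
    | some v =>
      obtain ⟨j, hj, _, _, hnotin⟩ := hok m hm v hlk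
      exact absurd (by simpa [pvPeelN] using hj) hnotin
  | succ r ih =>
    intro l f₁ f₂ hok h1 h2
    obtain ⟨a, rfl⟩ : ∃ a, f₁ = a + 1 := ⟨f₁ - 1, by omega⟩
    obtain ⟨b, rfl⟩ : ∃ b, f₂ = b + 1 := ⟨f₂ - 1, by omega⟩
    simp only [emoExpand]
    rw [PySem.List.foldl_append_eq_flatMap, PySem.List.foldl_append_eq_flatMap]
    simp only [List.nil_append]
    apply List.flatMap_congr
    intro m hm
    cases hlk : mo.lookup m with
    | none => rfl
    | some v =>
      obtain ⟨j, hj, hkey, hval, hnotin⟩ := hok m hm v hlk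
      by_cases hjr : j ∈ pvPeelN mo r
      · -- the defining entry was removed exactly at round r+1: recurse into its value list
        have hcok : emoOK mo r v := emo_children_ok mo hval hjr hnotin
        exact ih v a b hcok (by omega) (by omega)
      · -- removed at an earlier round: the whole singleton is emoOK at r
        have hok1 : emoOK mo r [m] := by
          intro s hs v' hlk'
          have hsm : s = m := by simpa using hs
          subst hsm
          have hv : v' = v := by rw [hlk] at hlk'; exact (Option.some.inj hlk').symm
          subst hv
          exact ⟨j, hj, hkey, hval, hjr⟩
        have := ih [m] (a + 1) (b + 1) hok1 (by omega) (by omega)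
        rw [emo_single, emo_single, hlk] at this
        exact this

-- fuel stability of bWeight, in the same shape
lemma emo_wt_stable (mo : List (String × List String)) :
    ∀ r t f₁ f₂, emoOK mo r [t] → r < f₁ → r < f₂ →
      bWeight f₁ t mo = bWeight f₂ t mo := by
  intro r
  induction r with
  | zero =>
    intro t f₁ f₂ hok h1 h2
    obtain ⟨a, rfl⟩ : ∃ a, f₁ = a + 1 := ⟨f₁ - 1, by omega⟩
    obtain ⟨b, rfl⟩ : ∃ b, f₂ = b + 1 := ⟨f₂ - 1, by omega⟩
    cases hlk : mo.lookup t with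
    | none => simp [bWeight, hlk]
    | some v =>
      obtain ⟨j, hj, _, _, hnotin⟩ := hok t (by simp) v hlk
      exact absurd (by simpa [pvPeelN] using hj) hnotin
  | succ r ih =>
    intro t f₁ f₂ hok h1 h2
    obtain ⟨a, rfl⟩ : ∃ a, f₁ = a + 1 := ⟨f₁ - 1, by omega⟩
    obtain ⟨b, rfl⟩ : ∃ b, f₂ = b + 1 := ⟨f₂ - 1, by omega⟩
    cases hlk : mo.lookup t with
    | none => simp [bWeight, hlk]
    | some v =>
      obtain ⟨j, hj, hkey, hval, hnotin⟩ := hok t (by simp) v hlk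
      by_cases hjr : j ∈ pvPeelN mo r
      · have hcok : emoOK mo r v := emo_children_ok mo hval hjr hnotin
        simp only [bWeight, hlk]
        congr 1
        apply congrArg
        apply List.map_congr_left
        intro s hs
        have hsok : emoOK mo r [s] := by
          intro s' hs' v' hlk'
          have hss : s' = s := by simpa using hs'
          subst hss
          exact hcok s' hs v' hlk'
        exact ih s a b hsok (by omega) (by omega)
      · have hok1 : emoOK mo r [t] := by
          intro s hs v' hlk'
          have hst : s = t := by simpa using hs
          subst hst
          have hv : v' = v := by rw [hlk] at hlk'; exact (Option.some.inj hlk').symm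
          subst hv
          exact ⟨j, hj, hkey, hval, hjr⟩
        exact ih t (a + 1) (b + 1) hok1 (by omega) (by omega)

-- per-token expansion of the A-side fold, at full fuel
lemma emo_token (mo : List (String × List String)) (co : List (String × String)) (l : List String) :
    emoExpand (mo.length + 1) l mo co =
      l.flatMap (fun m =>
        match mo.lookup m with
        | some v => emoExpand mo.length v mo co
        | none => match co.lookup m with
                  | some c => [c]
                  | none => [m]) := by
  simp only [emoExpand]
  rw [PySem.List.foldl_append_eq_flatMap]
  simp

lemma emo_full_key (mo : List (String × List String)) (co : List (String × String))
    {t : String} {v : List String}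
    (hok : emoOK mo mo.length [t]) (hlk : mo.lookup t = some v) :
    emoExpand mo.length v mo co = emoExpand (mo.length + 1) v mo co := by
  obtain ⟨r, hr, h⟩ := emo_value_ok mo hok hlk
  exact emo_stable mo co r v mo.length (mo.length + 1) h (by omega) (by omega)

lemma emo_wt_full_key (mo : List (String × List String))
    {t : String} {v : List String}
    (hok : emoOK mo mo.length [t]) (hlk : mo.lookup t = some v) :
    bWeight (mo.length + 1) t mo
      = 1 + (v.map (fun s => bWeight (mo.length + 1) s mo)).sum := by
  obtain ⟨r, hr, hcok⟩ := emo_value_ok mo hok hlk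
  conv_lhs => rw [bWeight, hlk]
  show 1 + (v.map (fun s => bWeight mo.length s mo)).sum
      = 1 + (v.map (fun s => bWeight (mo.length + 1) s mo)).sum
  congr 1
  apply congrArg
  apply List.map_congr_left
  intro s hs
  have hsok : emoOK mo r [s] := by
    intro s' hs' v' hlk'
    have hss : s' = s := by simpa using hs'
    subst hss
    exact hcok s' hs v' hlk'
  exact emo_wt_stable mo r s mo.length (mo.length + 1) hsok (by omega) (by omega)

lemma emo_wt_pos (f : Nat) (t : String) (mo : List (String × List String)) : 1 ≤ bWeight f t mo := by
  cases f with
  | zero => simp [bWeight]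
  | succ f => simp only [bWeight]; cases mo.lookup t <;> simp

-- B's loop, run on an emoOK stack with fuel ≥ its total weight, produces out ++ (A-expansion of the stack)
lemma emo_bLoop_eq (mo : List (String × List String)) (co : List (String × String)) :
    ∀ f s out, emoOK mo mo.length s → (s.map (fun t => bWeight (mo.length + 1) t mo)).sum ≤ f →
      bLoop f s out mo co = out ++ emoExpand (mo.length + 1) s mo co := by
  intro f
  induction f with
  | zero =>
    intro s out _ hw
    cases s with
    | nil => simp [bLoop, emoExpand]
    | cons t s' =>
      exfalso
      have := emo_wt_pos (mo.length + 1) t mo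
      simp only [List.map_cons, List.sum_cons] at hw
      omega
  | succ f IH =>
    intro s out hok hw
    cases s with
    | nil => simp [bLoop, emoExpand]
    | cons t s' =>
      obtain ⟨hokt, hoks'⟩ := emoOK_of_cons mo hok
      rw [emo_token]
      simp only [List.flatMap_cons, List.map_cons, List.sum_cons] at hw ⊢
      cases hlk : mo.lookup t with
      | some v =>
        simp only [bLoop, hlk]
        have hokv : emoOK mo mo.length v := emoOK_close mo hokt hlk
        rw [emo_wt_full_key mo hokt hlk] at hw
        have hw' : ((v ++ s').map (fun t => bWeight (mo.length + 1) t mo)).sum ≤ f := by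
          simp only [List.map_append, List.sum_append]; omega
        rw [IH (v ++ s') out (emoOK_append mo hokv hoks') hw']
        rw [emo_token mo co (v ++ s'), List.flatMap_append,
            emo_full_key mo co hokt hlk, emo_token mo co v]
      | none =>
        cases hco : co.lookup t with
        | some c =>
          simp only [bLoop, hlk, hco]
          rw [IH s' (out ++ [c]) hoks' (by have := emo_wt_pos (mo.length + 1) t mo; omega), emo_token]
          simp
        | none =>
          simp only [bLoop, hlk, hco]
          rw [IH s' (out ++ [t]) hoks' (by have := emo_wt_pos (mo.length + 1) t mo; omega), emo_token]
          simp

-- Pre_ says exactly that every tile_list token is emoOK at the final round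
lemma emo_pre_ok (tl : List String) (mo : List (String × List String)) (co : List (String × String))
    (hP : Pre_expand_meta_objs tl mo co) : emoOK mo mo.length tl := by
  intro s hs v hlk
  obtain ⟨j, hj, hkey, hval, hmin⟩ := emo_lookup_idx mo s v hlk
  exact ⟨j, hj, hkey, hval, hP s hs j hj hkey hmin⟩

-- ===== VERDICT (by name: the statement is the Claim_ definition above) =====
theorem expand_meta_objs_spec : Claim_equal_expand_meta_objs := by
  intro tile_list meta_objs char_to_obj _ hP
  unfold Spec_expand_meta_objs expand_meta_objs expand_meta_objs_alt
  rw [emo_bLoop_eq meta_objs char_to_obj _ tile_list []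
      (emo_pre_ok tile_list meta_objs char_to_obj hP) (le_refl _)]
  simp
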